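-- pv_equiv track=rewrite | github.com/omsm/URDM6300 | urdm6300/__init__.py | _process_fragment
-- ===== SOURCE A (Python) =====
-- def _process_fragment(fragment):
--     """Processes the received fragment and returns CardData."""
--     if len(fragment) != 12:
--         return None
--
--     calculated_checksum = 0
--     for i in range(0, 10, 2):
--         byte = (fragment[i] << 4) | fragment[i + 1]
--         calculated_checksum ^= byte
--
--     received_checksum = (fragment[10] << 4) | fragment[11]
--     card_value = 0
--     for i in range(2, 10):
--         card_value = (card_value << 4) | fragment[i]
--
--     card_type = (fragment[0] << 4) | fragment[1]
--     is_valid = received_checksum == calculated_checksum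
--
--     return is_valid, card_value, received_checksum, card_type
-- ===== SOURCE B (Python) =====
-- def _process_fragment(fragment):
--     """Processes the received fragment and returns CardData."""
--     if len(fragment) != 12:
--         return None
--     bs = [(fragment[i] << 4) | fragment[i + 1] for i in range(0, 12, 2)]
--     card_type, b1, b2, b3, b4, received_checksum = bs
--     calculated_checksum = card_type ^ b1 ^ b2 ^ b3 ^ b4
--     card_value = ((((b1 << 8) | b2) << 8 | b3) << 8) | b4
--     is_valid = received_checksum == calculated_checksum
--     return is_valid, card_value, received_checksum, card_type
-- ===== Notes on version B (the rewrite author's own statement) =====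
-- stated objective: alternative
-- what changed: A runs two separate nibble loops over the fragment (a step-2 xor loop building the checksum and a step-1 shift-or loop building the card value); B builds the six bytes once in a single comprehension and derives every field from that byte array by destructuring, a xor chain over the bytes and a byte-wise (<<8 | b) recombination.
import Mathlib
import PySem

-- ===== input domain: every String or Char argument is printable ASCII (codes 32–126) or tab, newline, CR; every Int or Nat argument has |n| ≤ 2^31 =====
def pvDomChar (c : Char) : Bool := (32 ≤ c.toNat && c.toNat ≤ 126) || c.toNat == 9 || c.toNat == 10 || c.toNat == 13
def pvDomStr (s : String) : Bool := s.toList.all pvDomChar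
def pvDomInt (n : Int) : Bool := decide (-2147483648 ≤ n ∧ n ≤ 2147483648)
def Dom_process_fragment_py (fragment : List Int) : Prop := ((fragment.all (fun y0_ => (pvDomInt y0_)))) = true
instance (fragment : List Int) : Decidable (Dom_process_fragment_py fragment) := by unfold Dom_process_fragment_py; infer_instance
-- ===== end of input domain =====

-- B replaces A's two nibble loops by one byte array built once, with every field derived from it (alternative decomposition, same cost).

-- ===== PORT A =====
def process_fragment_py (fragment : List Int) : Option (Bool × Int × Int × Int) :=
  if fragment.length ≠ 12 then none
  else
    let calculated_checksum := (PySem.List.pyRange 0 10 2).foldl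
      (fun acc i => PySem.Int.bxor acc
        (PySem.Int.bor (PySem.List.pyGetD fragment i 0 <<< (4:Nat)) (PySem.List.pyGetD fragment (i+1) 0))) 0
    let received_checksum := PySem.Int.bor (PySem.List.pyGetD fragment 10 0 <<< (4:Nat)) (PySem.List.pyGetD fragment 11 0)
    let card_value := (PySem.List.pyRange 2 10 1).foldl
      (fun cv i => PySem.Int.bor (cv <<< (4:Nat)) (PySem.List.pyGetD fragment i 0)) 0
    let card_type := PySem.Int.bor (PySem.List.pyGetD fragment 0 0 <<< (4:Nat)) (PySem.List.pyGetD fragment 1 0)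
    some (decide (received_checksum = calculated_checksum), card_value, received_checksum, card_type)

-- ===== PORT B =====
def process_fragment_py_alt (fragment : List Int) : Option (Bool × Int × Int × Int) :=
  if fragment.length ≠ 12 then none
  else
    let bs := (PySem.List.pyRange 0 12 2).map
      (fun i => PySem.Int.bor (PySem.List.pyGetD fragment i 0 <<< (4:Nat)) (PySem.List.pyGetD fragment (i+1) 0))
    match bs with
    | [card_type, b1, b2, b3, b4, received_checksum] =>
      let calculated_checksum := PySem.Int.bxor (PySem.Int.bxor (PySem.Int.bxor (PySem.Int.bxor card_type b1) b2) b3) b4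
      let card_value := PySem.Int.bor ((PySem.Int.bor ((PySem.Int.bor (b1 <<< (8:Nat)) b2) <<< (8:Nat)) b3) <<< (8:Nat)) b4
      some (decide (received_checksum = calculated_checksum), card_value, received_checksum, card_type)
    | _ => none   -- unreachable: the guard forces exactly six bytes (Python unpacking would raise otherwise)

-- ===== PRECONDITION & SPEC =====
def Spec_process_fragment_py (fragment : List Int) (out : Option (Bool × Int × Int × Int)) : Prop := out = process_fragment_py_alt fragment
instance (fragment : List Int) (out : Option (Bool × Int × Int × Int)) : Decidable (Spec_process_fragment_py fragment out) := by unfold Spec_process_fragment_py; infer_instance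

-- ===== CLAIM (what is proved, stated in full; the proofs are below) =====
def Claim_equal_process_fragment_py : Prop := ∀ (fragment : List Int), Dom_process_fragment_py fragment → Spec_process_fragment_py fragment (process_fragment_py fragment)

-- ===== LEMMAS AND PROOFS =====

-- Nat-level toolbox ---------------------------------------------------------

theorem pvNat_add_eq_or_of_and_eq_zero (a : Nat) : ∀ b : Nat, a &&& b = 0 → a + b = a ||| b := by
  induction a using Nat.strong_induction_on with
  | _ a ih =>
    intro b h
    rcases Nat.eq_zero_or_pos a with ha | ha
    · simp [ha]
    have h2 : a / 2 &&& b / 2 = 0 := by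
      rw [← Nat.and_div_two, h]
    have ih2 : a / 2 + b / 2 = a / 2 ||| b / 2 := ih (a / 2) (Nat.div_lt_self ha (by norm_num)) _ h2
    have hm : ¬ (a % 2 = 1 ∧ b % 2 = 1) := by
      intro ⟨h1, h2'⟩
      have : (a &&& b).testBit 0 = true := by
        rw [Nat.testBit_and]
        simp [Nat.testBit_zero, h1, h2']
      rw [h] at this
      simp [Nat.testBit_zero] at this
    have hor2 : (a ||| b) / 2 = a / 2 ||| b / 2 := Nat.or_div_two
    have horm : (a ||| b) % 2 = a % 2 + b % 2 := by
      have pab := Nat.mod_two_eq_zero_or_one (a ||| b)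
      rcases Nat.mod_two_eq_zero_or_one a with pa | pa <;> rcases Nat.mod_two_eq_zero_or_one b with pb | pb
      · have t1 : (a ||| b) % 2 ≠ 1 := by simp [Nat.or_mod_two_eq_one, pa, pb]
        omega
      · have t1 : (a ||| b) % 2 = 1 := Nat.or_mod_two_eq_one.mpr (Or.inr pb)
        omega
      · have t1 : (a ||| b) % 2 = 1 := Nat.or_mod_two_eq_one.mpr (Or.inl pa)
        omega
      · exact absurd ⟨pa, pb⟩ hm
    have step : a + b = 2 * (a / 2 ||| b / 2) + (a % 2 + b % 2) := by
      rw [← ih2]; omega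
    rw [← hor2, ← horm] at step
    omega

theorem pvNat_sub_and_eq_ldiff (n m : Nat) : n - (n &&& m) = Nat.ldiff n m := by
  have hdis : Nat.ldiff n m &&& (n &&& m) = 0 := by
    apply Nat.eq_of_testBit_eq
    intro i
    simp only [Nat.testBit_and, Nat.testBit_ldiff, Nat.zero_testBit]
    cases n.testBit i <;> cases m.testBit i <;> rfl
  have hor : Nat.ldiff n m ||| (n &&& m) = n := by
    apply Nat.eq_of_testBit_eq
    intro i
    simp only [Nat.testBit_or, Nat.testBit_and, Nat.testBit_ldiff]
    cases n.testBit i <;> cases m.testBit i <;> rfl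
  have := pvNat_add_eq_or_of_and_eq_zero (Nat.ldiff n m) (n &&& m) hdis
  have hle : n &&& m ≤ n := Nat.and_le_left
  omega

-- Int testBit toolbox -------------------------------------------------------

theorem pvInt_ext_testBit {a b : Int} (h : ∀ i : Nat, a.testBit i = b.testBit i) : a = b := by
  cases a with
  | ofNat m =>
    cases b with
    | ofNat n =>
      have : m = n := Nat.eq_of_testBit_eq fun i => h i
      simp [this]
    | negSucc n =>
      exfalso
      have hi := h (m + n)
      have hm : m.testBit (m + n) = false :=
        Nat.testBit_lt_two_pow (lt_of_lt_of_le (Nat.lt_two_pow_self) (Nat.pow_le_pow_right (by norm_num) (Nat.le_add_right m n)))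
      have hn : n.testBit (m + n) = false :=
        Nat.testBit_lt_two_pow (lt_of_lt_of_le (Nat.lt_two_pow_self) (Nat.pow_le_pow_right (by norm_num) (Nat.le_add_left n m)))
      simp [Int.testBit, hm, hn] at hi
  | negSucc m =>
    cases b with
    | ofNat n =>
      exfalso
      have hi := h (m + n)
      have hm : m.testBit (m + n) = false :=
        Nat.testBit_lt_two_pow (lt_of_lt_of_le (Nat.lt_two_pow_self) (Nat.pow_le_pow_right (by norm_num) (Nat.le_add_right m n)))
      have hn : n.testBit (m + n) = false :=
        Nat.testBit_lt_two_pow (lt_of_lt_of_le (Nat.lt_two_pow_self) (Nat.pow_le_pow_right (by norm_num) (Nat.le_add_left n m)))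
      simp [Int.testBit, hm, hn] at hi
    | negSucc n =>
      have : m = n := Nat.eq_of_testBit_eq fun i => by
        have := h i
        simpa [Int.testBit] using this
      simp [this]

theorem pvTb_shl (x : Int) (k i : Nat) :
    (x <<< k).testBit i = (decide (k ≤ i) && x.testBit (i - k)) := by
  cases x with
  | ofNat n =>
    show (Int.ofNat (n <<< k)).testBit i = _
    simp [Int.testBit, Nat.testBit_shiftLeft, ge_iff_le]
  | negSucc n =>
    show (Int.negSucc ((n + 1) <<< k - 1)).testBit i = _
    have hd : (n <<< k) &&& (2 ^ k - 1) = 0 := by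
      apply Nat.eq_of_testBit_eq
      intro j
      simp only [Nat.testBit_and, Nat.testBit_shiftLeft, Nat.testBit_two_pow_sub_one, Nat.zero_testBit]
      by_cases hj : k ≤ j
      · simp [hj, Nat.not_lt.mpr hj]
      · simp [hj]
    have hsum : (n + 1) <<< k - 1 = (n <<< k) ||| (2 ^ k - 1) := by
      have h1 : (n + 1) <<< k = (n + 1) * 2 ^ k := Nat.shiftLeft_eq _ _
      have h2 : n <<< k = n * 2 ^ k := Nat.shiftLeft_eq _ _
      have h3 := pvNat_add_eq_or_of_and_eq_zero (n <<< k) (2 ^ k - 1) hd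
      have hp : 1 ≤ 2 ^ k := Nat.one_le_two_pow
      have h4 : (n + 1) * 2 ^ k = n * 2 ^ k + 2 ^ k := by ring
      omega
    rw [hsum]
    simp only [Int.testBit, Nat.testBit_or, Nat.testBit_shiftLeft, Nat.testBit_two_pow_sub_one, ge_iff_le]
    by_cases hik : k ≤ i
    · simp [hik, Nat.not_lt.mpr hik]
    · simp [hik, Nat.lt_of_not_le hik]

theorem pvTb_bor (a b : Int) (i : Nat) :
    (PySem.Int.bor a b).testBit i = (a.testBit i || b.testBit i) := by
  cases a with
  | ofNat m =>
    cases b with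
    | ofNat n =>
      have : PySem.Int.bor (Int.ofNat m) (Int.ofNat n) = Int.ofNat (m ||| n) := by
        simp [PySem.Int.bor]
      rw [this]
      simp [Int.testBit, Nat.testBit_or]
    | negSucc n =>
      have h1 : PySem.Int.bor (Int.ofNat m) (Int.negSucc n) = Int.negSucc (n - (n &&& m)) := by
        simp only [PySem.Int.bor]
        rw [if_pos (by exact Int.natCast_nonneg m), if_neg (by simp [Int.negSucc_eq]; try omega)]
        have e1 : (-(Int.negSucc n) - 1).toNat = n := by simp [Int.negSucc_eq]; try omega
        rw [e1]
        show -((n - (n &&& (Int.ofNat m).toNat) : Nat) : Int) - 1 = _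
        have e3 : (Int.ofNat m).toNat = m := Int.toNat_natCast m
        rw [e3, Int.negSucc_eq]
        have : n &&& m ≤ n := Nat.and_le_left
        omega
      rw [h1, pvNat_sub_and_eq_ldiff]
      simp only [Int.testBit, Nat.testBit_ldiff]
      cases m.testBit i <;> cases n.testBit i <;> rfl
  | negSucc m =>
    cases b with
    | ofNat n =>
      rw [PySem.Int.bor_comm]
      have h1 : PySem.Int.bor (Int.ofNat n) (Int.negSucc m) = Int.negSucc (m - (m &&& n)) := by
        simp only [PySem.Int.bor]
        rw [if_pos (by exact Int.natCast_nonneg n), if_neg (by simp [Int.negSucc_eq]; try omega)]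
        have e1 : (-(Int.negSucc m) - 1).toNat = m := by simp [Int.negSucc_eq]; try omega
        rw [e1]
        have e3 : (Int.ofNat n).toNat = n := Int.toNat_natCast n
        rw [e3, Int.negSucc_eq]
        have : m &&& n ≤ m := Nat.and_le_left
        omega
      rw [h1, pvNat_sub_and_eq_ldiff]
      simp only [Int.testBit, Nat.testBit_ldiff]
      cases m.testBit i <;> cases n.testBit i <;> rfl
    | negSucc n =>
      have h1 : PySem.Int.bor (Int.negSucc m) (Int.negSucc n) = Int.negSucc (m &&& n) := by
        simp only [PySem.Int.bor]
        rw [if_neg (by simp [Int.negSucc_eq]; try omega)]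
        rw [if_neg (by simp [Int.negSucc_eq]; try omega)]
        have e1 : (-(Int.negSucc m) - 1).toNat = m := by simp [Int.negSucc_eq]; try omega
        have e2 : (-(Int.negSucc n) - 1).toNat = n := by simp [Int.negSucc_eq]; try omega
        rw [e1, e2, Int.negSucc_eq]
        omega
      rw [h1]
      simp only [Int.testBit, Nat.testBit_and]
      cases m.testBit i <;> cases n.testBit i <;> rfl

-- the key recombination identity: consuming two nibbles equals or-ing in one byte
theorem pvK (v a b : Int) :
    PySem.Int.bor ((PySem.Int.bor (v <<< (4:Nat)) a) <<< (4:Nat)) b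
      = PySem.Int.bor (v <<< (8:Nat)) (PySem.Int.bor (a <<< (4:Nat)) b) := by
  apply pvInt_ext_testBit
  intro i
  simp only [pvTb_bor, pvTb_shl]
  by_cases h8 : 8 ≤ i
  · have h4 : 4 ≤ i := by omega
    have h4' : 4 ≤ i - 4 := by omega
    have e : i - 4 - 4 = i - 8 := by omega
    simp [h4, h4', h8, e, Bool.or_assoc]
  · by_cases h4 : 4 ≤ i
    · have h4' : ¬ 4 ≤ i - 4 := by omega
      simp [h4, h4', h8]
    · simp [h4, h8]

theorem pvBor_zero_left (x : Int) : PySem.Int.bor 0 x = x := by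
  rw [PySem.Int.bor_comm]; exact PySem.Int.bor_zero x

theorem pvBxor_zero_left (x : Int) : PySem.Int.bxor 0 x = x := by
  rw [PySem.Int.bxor_comm]; exact PySem.Int.bxor_zero x

theorem pvRange_0_10_2 : PySem.List.pyRange 0 10 2 = [0, 2, 4, 6, 8] := by decide
theorem pvRange_2_10_1 : PySem.List.pyRange 2 10 1 = [2, 3, 4, 5, 6, 7, 8, 9] := by decide
theorem pvRange_0_12_2 : PySem.List.pyRange 0 12 2 = [0, 2, 4, 6, 8, 10] := by decide

-- ===== VERDICT (by name: the statement is the Claim_ definition above) =====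
theorem process_fragment_py_spec : Claim_equal_process_fragment_py := by
  intro fragment _
  unfold Spec_process_fragment_py process_fragment_py process_fragment_py_alt
  by_cases hl : fragment.length = 12
  · rcases fragment with _ | ⟨a0, _ | ⟨a1, _ | ⟨a2, _ | ⟨a3, _ | ⟨a4, _ | ⟨a5, _ | ⟨a6, _ | ⟨a7, _ | ⟨a8, _ | ⟨a9, _ | ⟨a10, _ | ⟨a11, rest⟩⟩⟩⟩⟩⟩⟩⟩⟩⟩⟩⟩ <;>
      simp_all
    have hrest : rest = [] := List.length_eq_zero_iff.mp (by simpa using hl)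
    subst hrest
    rw [pvRange_0_10_2, pvRange_2_10_1, pvRange_0_12_2]
    simp only [List.foldl, List.map]
    simp only [PySem.List.pyGetD]
    norm_num [PySem.List.pyIdx?]
    rw [pvBxor_zero_left]
    constructor
    · rfl
    rw [pvBor_zero_left]
    rw [pvK, pvK, pvK]
  · simp [hl]
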